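-- pv_equiv track=rewrite | github.com/alantero/guitar_scale_finder | fretboard_core.py | parse_degree_token
-- ===== SOURCE A (Python) =====
-- def parse_degree_token(token: str) -> tuple[int, int]:
--     t = token.strip()
--     if not t:
--         raise ValueError("Empty degree token")
--
--     t = t.replace("♭", "b").replace("♯", "#")
--
--     if t.lower() in ["r", "root"]:
--         return 1, 0
--
--     def is_acc(ch: str) -> bool:
--         return ch in ["b", "#", "x"]
--
--     i = 0
--     n = len(t)
--
--     prefix = ""
--     while i < n and is_acc(t[i]):
--         prefix += t[i]
--         i += 1
--
--     if i >= n or not t[i].isdigit():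
--         raise ValueError(f"Invalid degree token: {token}")
--
--     j = i
--     while j < n and t[j].isdigit():
--         j += 1
--
--     num_str = t[i:j]
--     suffix = ""
--     k = j
--     while k < n and is_acc(t[k]):
--         suffix += t[k]
--         k += 1
--
--     if k != n:
--         raise ValueError(f"Invalid degree token: {token}")
--
--     degree = int(num_str)
--     acc = prefix + suffix
--
--     shift = 0
--     for ch in acc:
--         if ch == "b":
--             shift -= 1
--         elif ch == "#":
--             shift += 1
--         elif ch == "x":
--             shift += 2
--
--     return degree, shift
-- ===== SOURCE B (Python) =====
-- import re
--
-- _TOKEN_RE = re.compile(r"([b#x]*)(\d+)([b#x]*)")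
-- _SHIFT = {"b": -1, "#": 1, "x": 2}
--
--
-- def parse_degree_token(token: str) -> tuple[int, int]:
--     t = token.strip()
--     if not t:
--         raise ValueError("Empty degree token")
--
--     t = t.replace("♭", "b").replace("♯", "#")
--
--     if t.lower() in ("r", "root"):
--         return 1, 0
--
--     m = _TOKEN_RE.fullmatch(t)
--     if m is None:
--         raise ValueError(f"Invalid degree token: {token}")
--
--     return int(m.group(2)), sum(_SHIFT[c] for c in m.group(1) + m.group(3))
-- ===== Notes on version B (the rewrite author's own statement) =====
-- stated objective: idiomatic
-- what changed: Replaces the four hand-written index loops (prefix scan, digit scan, suffix scan, if-chain shift accumulation) by a single anchored regex match ([b#x]*)(\d+)([b#x]*) plus a dict-table sum over the captured accidental groups.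
import Mathlib
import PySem

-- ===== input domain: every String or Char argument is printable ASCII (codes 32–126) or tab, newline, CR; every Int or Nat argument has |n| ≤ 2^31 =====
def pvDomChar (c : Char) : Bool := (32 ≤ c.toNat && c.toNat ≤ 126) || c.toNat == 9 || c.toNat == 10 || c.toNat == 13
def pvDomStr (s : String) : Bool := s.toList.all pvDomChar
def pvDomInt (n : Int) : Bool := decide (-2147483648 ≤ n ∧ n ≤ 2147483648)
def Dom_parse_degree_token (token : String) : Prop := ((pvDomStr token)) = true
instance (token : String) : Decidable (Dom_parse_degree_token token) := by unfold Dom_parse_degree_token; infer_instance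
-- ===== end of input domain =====

-- B rewrites A's four hand-written scanning loops as one anchored regex match plus a
-- table-lookup sum over the accidental groups (objective: idiomatic; same exact behaviour).

-- ===== PORT A =====
-- is_acc(ch): ch in ["b", "#", "x"]
def pvAIsAcc (ch : Char) : Bool := decide (ch ∈ ['b', '#', 'x'])

-- 'while i < n and is_acc(t[i]): prefix += t[i]; i += 1' — scan accumulating the taken chars
def pvAScanAcc (acc : List Char) : List Char → List Char × List Char
  | [] => (acc, [])
  | c :: cs => if pvAIsAcc c then pvAScanAcc (acc ++ [c]) cs else (acc, c :: cs)

-- 'while j < n and t[j].isdigit(): j += 1' together with num_str = t[i:j]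
def pvAScanDig (acc : List Char) : List Char → List Char × List Char
  | [] => (acc, [])
  | c :: cs => if PySem.Chars.isdigit c then pvAScanDig (acc ++ [c]) cs else (acc, c :: cs)

def parse_degree_token (token : String) : Int × Int :=
  let t0 := PySem.Chars.strip token.toList
  if t0 = [] then (0, 0)   -- raise ValueError("Empty degree token"): outside Pre_
  else
    let t := PySem.Chars.replace (PySem.Chars.replace t0 ['♭'] ['b']) ['♯'] ['#']
    if PySem.Chars.lower t = ['r'] ∨ PySem.Chars.lower t = ['r','o','o','t'] then (1, 0)
    else
      let p := pvAScanAcc [] t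
      match p.2 with
      | [] => (0, 0)       -- raise ValueError(f"Invalid degree token: {token}"): outside Pre_
      | c :: _ =>
        if PySem.Chars.isdigit c = false then (0, 0)   -- raise: outside Pre_
        else
          let q := pvAScanDig [] p.2
          let r := pvAScanAcc [] q.2
          if r.2 ≠ [] then (0, 0)                      -- raise: outside Pre_
          else
            let degree := (PySem.Int.ofChars? q.1).getD 0
            let shift := (p.1 ++ r.1).foldl
              (fun s ch => if ch = 'b' then s - 1 else if ch = '#' then s + 1
                           else if ch = 'x' then s + 2 else s) 0
            (degree, shift)

-- ===== PORT B =====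
-- the character class [b#x]
def pvBAcc (c : Char) : Bool := c = 'b' || c = '#' || c = 'x'

-- hand-port of _TOKEN_RE.fullmatch(t) with _TOKEN_RE = re.compile(r"([b#x]*)(\d+)([b#x]*)"):
-- the greedy anchored match is exactly takeWhile/dropWhile splitting (\d ported as isdigit, exact on ASCII)
def pvBMatch (t : List Char) : Option (List Char × List Char × List Char) :=
  let g1 := t.takeWhile pvBAcc
  let r1 := t.dropWhile pvBAcc
  let g2 := r1.takeWhile PySem.Chars.isdigit
  let r2 := r1.dropWhile PySem.Chars.isdigit
  if g2 ≠ [] ∧ r2.dropWhile pvBAcc = [] then some (g1, g2, r2.takeWhile pvBAcc) else none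

-- _SHIFT[c] for c captured by [b#x]
def pvBShift (c : Char) : Int := if c = 'b' then -1 else if c = '#' then 1 else 2

def parse_degree_token_alt (token : String) : Int × Int :=
  let t0 := PySem.Chars.strip token.toList
  if t0 = [] then (0, 0)   -- raise ValueError("Empty degree token"): outside Pre_
  else
    let t := PySem.Chars.replace (PySem.Chars.replace t0 ['♭'] ['b']) ['♯'] ['#']
    if PySem.Chars.lower t = ['r'] ∨ PySem.Chars.lower t = ['r','o','o','t'] then (1, 0)
    else
      match pvBMatch t with
      | none => (0, 0)     -- raise ValueError(f"Invalid degree token: {token}"): outside Pre_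
      | some (g1, g2, g3) =>
        ((PySem.Int.ofChars? g2).getD 0, ((g1 ++ g3).map pvBShift).sum)

-- ===== PRECONDITION & SPEC =====
-- Pre_ excludes exactly the inputs on which A raises ValueError: a token that is empty after
-- strip, or whose stripped/replaced text is not r/root and not of the shape [b#x]* digits [b#x]*.
def Pre_parse_degree_token (token : String) : Prop :=
  let t0 := PySem.Chars.strip token.toList
  t0 ≠ [] ∧
    (let t := PySem.Chars.replace (PySem.Chars.replace t0 ['♭'] ['b']) ['♯'] ['#']
     PySem.Chars.lower t = ['r'] ∨ PySem.Chars.lower t = ['r','o','o','t'] ∨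
       ((t.dropWhile pvBAcc).takeWhile PySem.Chars.isdigit ≠ [] ∧
        ((t.dropWhile pvBAcc).dropWhile PySem.Chars.isdigit).dropWhile pvBAcc = []))
instance (token : String) : Decidable (Pre_parse_degree_token token) := by
  unfold Pre_parse_degree_token; infer_instance

def pvWitness_parse_degree_token : String := "b5#"

def Spec_parse_degree_token (token : String) (out : Int × Int) : Prop := out = parse_degree_token_alt token
instance (token : String) (out : Int × Int) : Decidable (Spec_parse_degree_token token out) := by
  unfold Spec_parse_degree_token; infer_instance

-- ===== CLAIM (what is proved, stated in full; the proofs are below) =====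
def Claim_equal_parse_degree_token : Prop := ∀ (token : String), Dom_parse_degree_token token → Pre_parse_degree_token token → Spec_parse_degree_token token (parse_degree_token token)

-- ===== LEMMAS AND PROOFS =====
theorem pvAIsAcc_eq (c : Char) : pvAIsAcc c = pvBAcc c := by
  simp [pvAIsAcc, pvBAcc, Bool.or_assoc]

theorem pvAScanAcc_eq (l acc : List Char) :
    pvAScanAcc acc l = (acc ++ l.takeWhile pvBAcc, l.dropWhile pvBAcc) := by
  induction l generalizing acc with
  | nil => simp [pvAScanAcc]
  | cons c cs ih =>
    simp only [pvAScanAcc, pvAIsAcc_eq, List.takeWhile, List.dropWhile]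
    cases h : pvBAcc c <;> simp [ih]

theorem pvAScanDig_eq (l acc : List Char) :
    pvAScanDig acc l = (acc ++ l.takeWhile PySem.Chars.isdigit, l.dropWhile PySem.Chars.isdigit) := by
  induction l generalizing acc with
  | nil => simp [pvAScanDig]
  | cons c cs ih =>
    simp only [pvAScanDig, List.takeWhile, List.dropWhile]
    cases h : PySem.Chars.isdigit c <;> simp [ih]

theorem pvShiftFold_eq (l : List Char) (h : ∀ c ∈ l, pvBAcc c = true) (s : Int) :
    l.foldl (fun s ch => if ch = 'b' then s - 1 else if ch = '#' then s + 1
                         else if ch = 'x' then s + 2 else s) s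
      = s + (l.map pvBShift).sum := by
  induction l generalizing s with
  | nil => simp
  | cons c cs ih =>
    have hc : pvBAcc c = true := h c (List.mem_cons_self ..)
    have hcs : ∀ c ∈ cs, pvBAcc c = true := fun c hm => h c (List.mem_cons_of_mem _ hm)
    simp only [List.foldl_cons, List.map_cons, List.sum_cons, ih hcs]
    simp only [pvBAcc, Bool.or_eq_true, decide_eq_true_eq] at hc
    rcases hc with (h | h) | h <;> subst h <;> simp [pvBShift] <;> ring

-- ===== VERDICT (by name: the statement is the Claim_ definition above) =====
theorem parse_degree_token_spec : Claim_equal_parse_degree_token := by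
  intro token _ hpre
  unfold Spec_parse_degree_token parse_degree_token parse_degree_token_alt
  simp only []
  obtain ⟨h0, hrest⟩ := hpre
  set t0 := PySem.Chars.strip token.toList with ht0
  rw [if_neg h0, if_neg h0]
  set t := PySem.Chars.replace (PySem.Chars.replace t0 ['♭'] ['b']) ['♯'] ['#'] with ht
  by_cases hr : PySem.Chars.lower t = ['r'] ∨ PySem.Chars.lower t = ['r','o','o','t']
  · rw [if_pos hr, if_pos hr]
  · rw [if_neg hr, if_neg hr]
    rcases hrest with h | h | h
    · exact absurd (Or.inl h) hr
    · exact absurd (Or.inr h) hr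
    obtain ⟨hdig, hend⟩ := h
    rw [pvAScanAcc_eq, pvAScanDig_eq, pvAScanAcc_eq]
    unfold pvBMatch
    cases hm : List.dropWhile pvBAcc t with
    | nil => rw [hm] at hdig; simp at hdig
    | cons c cs =>
      rw [hm] at hdig hend
      have hc : PySem.Chars.isdigit c = true := by
        by_contra hcon
        simp only [Bool.not_eq_true] at hcon
        rw [List.takeWhile_cons, hcon] at hdig
        simp at hdig
      simp only [List.nil_append, List.takeWhile_cons, List.dropWhile_cons, hc, if_true, ne_eq]
      rw [List.dropWhile_cons, if_pos hc] at hend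
      simp only [hend, Bool.true_eq_false, if_false, not_true_eq_false, reduceCtorEq,
        not_false_eq_true, and_self, if_true]
      refine Prod.ext rfl ?_
      rw [pvShiftFold_eq]
      · simp
      · intro ch hmem
        rcases List.mem_append.mp hmem with h | h
        · exact List.mem_takeWhile_imp h
        · exact List.mem_takeWhile_imp h
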